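-- pv_equiv track=rewrite | github.com/jcolinpatrick/kryptos | scripts/transposition/other/e_solve_13_grid_routes.py | zigzag_td
-- ===== SOURCE A (Python) =====
-- def zigzag_td(rows, cols):
--     """Snake/zigzag: alternating top-down and bottom-up columns."""
--     positions = []
--     for c in range(cols):
--         if c % 2 == 0:
--             for r in range(rows):
--                 positions.append((r, c))
--         else:
--             for r in range(rows - 1, -1, -1):
--                 positions.append((r, c))
--     return positions
-- ===== SOURCE B (Python) =====
-- def zigzag_td(rows, cols):
--     """Snake/zigzag: alternating top-down and bottom-up columns."""
--     if rows <= 0 or cols <= 0: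
--         return []
--     out = []
--     for k in range(rows * cols):
--         c, off = divmod(k, rows)
--         r = off if c % 2 == 0 else rows - 1 - off
--         out.append((r, c))
--     return out
-- ===== Notes on version B (the rewrite author's own statement) =====
-- stated objective: alternative
-- what changed: Replaces the nested column/row loops with directional inner branches by a single flat loop over range(rows*cols) that derives each coordinate via divmod(k, rows) in closed form.
import Mathlib
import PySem

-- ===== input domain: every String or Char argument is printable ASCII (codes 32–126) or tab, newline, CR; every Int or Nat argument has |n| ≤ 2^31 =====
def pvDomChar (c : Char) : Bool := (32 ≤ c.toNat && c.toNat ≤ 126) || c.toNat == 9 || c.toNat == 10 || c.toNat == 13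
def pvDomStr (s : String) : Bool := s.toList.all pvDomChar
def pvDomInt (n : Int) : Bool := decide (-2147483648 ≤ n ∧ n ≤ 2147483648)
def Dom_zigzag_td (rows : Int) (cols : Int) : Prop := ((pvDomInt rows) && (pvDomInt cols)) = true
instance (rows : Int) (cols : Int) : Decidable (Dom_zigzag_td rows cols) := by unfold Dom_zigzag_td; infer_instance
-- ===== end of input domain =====

-- B replaces the nested column/row loops (with a directional branch) by one flat loop over
-- range(rows*cols) deriving each coordinate via divmod(k, rows); objective: alternative.

-- ===== PORT A =====
def zigzag_td (rows : Int) (cols : Int) : List (Int × Int) :=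
  (PySem.List.pyRange 0 cols 1).foldl (fun positions c =>
    if PySem.Int.mod c 2 = 0 then
      (PySem.List.pyRange 0 rows 1).foldl (fun p r => p ++ [(r, c)]) positions
    else
      (PySem.List.pyRange (rows - 1) (-1) (-1)).foldl (fun p r => p ++ [(r, c)]) positions) []

-- ===== PORT B =====
def zigzag_td_alt (rows : Int) (cols : Int) : List (Int × Int) :=
  if rows ≤ 0 ∨ cols ≤ 0 then []
  else
    (PySem.List.pyRange 0 (rows * cols) 1).foldl (fun out k =>
      let c := PySem.Int.floordiv k rows
      let off := PySem.Int.mod k rows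
      let r := if PySem.Int.mod c 2 = 0 then off else rows - 1 - off
      out ++ [(r, c)]) []

-- ===== PRECONDITION & SPEC =====
def Spec_zigzag_td (rows : Int) (cols : Int) (out : List (Int × Int)) : Prop := out = zigzag_td_alt rows cols
instance (rows : Int) (cols : Int) (out : List (Int × Int)) : Decidable (Spec_zigzag_td rows cols out) := by unfold Spec_zigzag_td; infer_instance

-- ===== CLAIM (what is proved, stated in full; the proofs are below) =====
def Claim_equal_zigzag_td : Prop := ∀ (rows : Int) (cols : Int), Dom_zigzag_td rows cols → Spec_zigzag_td rows cols (zigzag_td rows cols)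

-- ===== LEMMAS AND PROOFS =====

-- one column's block, as A emits it
def pvColBlk (rows : Int) (c : Int) : List (Int × Int) :=
  if PySem.Int.mod c 2 = 0 then
    (PySem.List.pyRange 0 rows 1).map (fun r => (r, c))
  else
    (PySem.List.pyRange (rows - 1) (-1) (-1)).map (fun r => (r, c))

-- B's per-element closed form
def pvF (rows : Int) (k : Int) : Int × Int :=
  ((if PySem.Int.mod (PySem.Int.floordiv k rows) 2 = 0 then PySem.Int.mod k rows
    else rows - 1 - PySem.Int.mod k rows), PySem.Int.floordiv k rows)

lemma zigzag_td_eq_flatMap (rows cols : Int) :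
    zigzag_td rows cols = (PySem.List.pyRange 0 cols 1).flatMap (pvColBlk rows) := by
  unfold zigzag_td
  have : ∀ (c : Int) (positions : List (Int × Int)),
      (if PySem.Int.mod c 2 = 0 then
        (PySem.List.pyRange 0 rows 1).foldl (fun p r => p ++ [(r, c)]) positions
      else
        (PySem.List.pyRange (rows - 1) (-1) (-1)).foldl (fun p r => p ++ [(r, c)]) positions)
      = positions ++ pvColBlk rows c := by
    intro c positions
    unfold pvColBlk
    split_ifs <;> rw [PySem.List.foldl_append_singleton_eq_map]
  calc (PySem.List.pyRange 0 cols 1).foldl _ []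
      = (PySem.List.pyRange 0 cols 1).foldl (fun positions c => positions ++ pvColBlk rows c) [] := by
        apply PySem.List.foldl_congr_mem
        intro acc x _
        exact this x acc
    _ = [] ++ (PySem.List.pyRange 0 cols 1).flatMap (pvColBlk rows) :=
        PySem.List.foldl_append_eq_flatMap _ _ _
    _ = _ := by simp

lemma zigzag_td_alt_eq_map (rows cols : Int) :
    zigzag_td_alt rows cols =
      if rows ≤ 0 ∨ cols ≤ 0 then []
      else (PySem.List.pyRange 0 (rows * cols) 1).map (pvF rows) := by
  unfold zigzag_td_alt
  split_ifs with h
  · rfl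
  · rw [PySem.List.foldl_append_singleton_eq_map]; rfl

lemma pvColBlk_empty (rows : Int) (hr : rows ≤ 0) (c : Int) : pvColBlk rows c = [] := by
  unfold pvColBlk
  split_ifs
  · rw [PySem.List.pyRange_one_eq_nil hr]; rfl
  · rw [PySem.List.pyRange_neg_one_eq_nil (by omega)]; rfl

-- block c of B's flat list is exactly A's column c
lemma pvBlock (rows : Int) (hr : 0 < rows) (c : Int) (_hc : 0 ≤ c) :
    (PySem.List.pyRange (rows * c) (rows * c + rows) 1).map (pvF rows) = pvColBlk rows c := by
  have hdiv : ∀ j : Nat, (j : Int) < rows →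
      PySem.Int.floordiv (rows * c + j) rows = c := by
    intro j hj
    rw [PySem.Int.floordiv_eq_iff_of_pos hr]
    constructor <;> nlinarith [Int.natCast_nonneg j]
  have hmod : ∀ j : Nat, (j : Int) < rows →
      PySem.Int.mod (rows * c + j) rows = (j : Int) := by
    intro j hj
    have h1 := PySem.Int.floordiv_mul_add_mod (rows * c + j) rows
    rw [hdiv j hj] at h1
    have h2 := PySem.Int.mod_nonneg (rows * c + (j:Int)) hr
    have h3 := PySem.Int.mod_lt (rows * c + (j:Int)) hr
    nlinarith
  rw [PySem.List.pyRange_one]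
  have hlen : (rows * c + rows - rows * c).toNat = rows.toNat := by omega
  rw [hlen]
  unfold pvColBlk
  have hmem : ∀ j ∈ List.range rows.toNat, (j : Int) < rows := by
    intro j hj; have := List.mem_range.mp hj; omega
  split_ifs with hpar
  · rw [PySem.List.pyRange_one]
    simp only [sub_zero, List.map_map]
    apply List.map_congr_left
    intro j hj
    have hjr := hmem j hj
    simp only [Function.comp, pvF, hdiv j hjr, hmod j hjr, hpar, if_pos]
    simp
  · rw [PySem.List.pyRange_neg_one]
    have hlen2 : (rows - 1 - (-1)).toNat = rows.toNat := by omega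
    rw [hlen2]
    simp only [List.map_map]
    apply List.map_congr_left
    intro j hj
    have hjr := hmem j hj
    simp only [Function.comp, pvF, hdiv j hjr, hmod j hjr, hpar]
    simp [sub_sub]

lemma pvMain (rows : Int) (hr : 0 < rows) (n : Nat) :
    (PySem.List.pyRange 0 (rows * n) 1).map (pvF rows) =
      (PySem.List.pyRange 0 (n : Int) 1).flatMap (pvColBlk rows) := by
  induction n with
  | zero => simp [PySem.List.pyRange_one_eq_nil]
  | succ m ih =>
    have h1 : (0 : Int) ≤ rows * m := by positivity
    have h2 : rows * (m : Int) ≤ rows * ((m : Int) + 1) := by nlinarith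
    push_cast
    rw [PySem.List.pyRange_one_append 0 (rows * m) (rows * ((m : Int) + 1)) h1 h2]
    rw [List.map_append, ih]
    rw [PySem.List.pyRange_one_succ_right (by omega : (0:Int) ≤ m)]
    rw [List.flatMap_append]
    congr 1
    have hsplit : rows * ((m : Int) + 1) = rows * m + rows := by ring
    rw [hsplit, pvBlock rows hr m (by omega)]
    simp [List.flatMap]

-- ===== VERDICT (by name: the statement is the Claim_ definition above) =====
theorem zigzag_td_spec : Claim_equal_zigzag_td := by
  intro rows cols _
  unfold Spec_zigzag_td
  rw [zigzag_td_eq_flatMap, zigzag_td_alt_eq_map]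
  split_ifs with h
  · rcases h with h | h
    · refine List.flatMap_eq_nil_iff.mpr ?_
      intro b _; exact pvColBlk_empty rows h b
    · rw [PySem.List.pyRange_one_eq_nil h]; rfl
  · rw [not_or, not_le, not_le] at h
    obtain ⟨hr, hc⟩ := h
    have : cols = (cols.toNat : Int) := by omega
    rw [this, pvMain rows (by omega) cols.toNat]
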